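-- pv_equiv track=rewrite | github.com/matiasportugau-ui/Chatbot-Truth-base--Creation | ai-project-files-organizer-agent/ai_files_organizer/core/outdated_detector.py | _suggest_action
-- ===== SOURCE A (Python) =====
-- from typing import Dict, List, Optional
--
-- def _suggest_action(reasons: List[Dict]) -> str:
--     """
--     Suggest action based on reasons.
--
--     Args:
--         reasons: List of reason dictionaries
--
--     Returns:
--         Suggested action string
--     """
--     has_duplicate = any(r["type"] == "duplicate" for r in reasons)
--     has_date = any(r["type"] == "date" for r in reasons)
--     has_unreferenced = any(r["type"] == "unreferenced" for r in reasons)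
--
--     if has_duplicate:
--         return "archive_or_delete"
--     elif has_date and has_unreferenced:
--         return "archive"
--     elif has_date:
--         return "review_and_update"
--     else:
--         return "review"
-- ===== SOURCE B (Python) =====
-- from typing import Dict, List
--
-- def _suggest_action(reasons: List[Dict]) -> str:
--     # Single pass: early-return on "duplicate", accumulate the other two flags.
--     has_date = False
--     has_unreferenced = False
--     for r in reasons:
--         t = r["type"]
--         if t == "duplicate":
--             return "archive_or_delete"
--         if t == "date":
--             has_date = True
--         elif t == "unreferenced":
--             has_unreferenced = True
--     if has_date and has_unreferenced:
--         return "archive"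
--     if has_date:
--         return "review_and_update"
--     return "review"
-- ===== Notes on version B (the rewrite author's own statement) =====
-- stated objective: simpler
-- what changed: Replaces A's three separate any()-scans over the list with one single pass that early-returns on the highest-priority reason type and accumulates the other two flags.
import Mathlib
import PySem

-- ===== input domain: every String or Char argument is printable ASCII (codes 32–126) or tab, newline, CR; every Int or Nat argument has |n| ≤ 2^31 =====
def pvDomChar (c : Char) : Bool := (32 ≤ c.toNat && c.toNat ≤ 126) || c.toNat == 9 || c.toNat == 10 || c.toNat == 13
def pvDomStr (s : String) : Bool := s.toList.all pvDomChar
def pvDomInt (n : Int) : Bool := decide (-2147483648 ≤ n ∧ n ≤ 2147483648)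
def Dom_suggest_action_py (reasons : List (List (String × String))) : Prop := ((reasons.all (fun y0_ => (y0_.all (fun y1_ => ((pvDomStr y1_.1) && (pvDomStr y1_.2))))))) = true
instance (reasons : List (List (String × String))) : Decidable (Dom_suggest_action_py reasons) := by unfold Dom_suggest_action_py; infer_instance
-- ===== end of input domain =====

-- B replaces A's three any()-scans with one single pass (early return on "duplicate", flags
-- for the other two types): simpler, one traversal instead of three.

-- ===== PORT A =====
-- any(r["type"] == t for r in reasons); none = KeyError on a dict without "type"
def pvAnyIs : List (List (String × String)) → String → Option Bool
  | [], _ => some false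
  | r :: rest, t =>
    match (PySem.Dict.ofList r).get? "type" with
    | none => none
    | some v => if v = t then some true else pvAnyIs rest t

def suggest_action_py (reasons : List (List (String × String))) : String :=
  match pvAnyIs reasons "duplicate", pvAnyIs reasons "date", pvAnyIs reasons "unreferenced" with
  | some has_duplicate, some has_date, some has_unreferenced =>
    if has_duplicate then "archive_or_delete"
    else if has_date && has_unreferenced then "archive"
    else if has_date then "review_and_update"
    else "review"
  | _, _, _ => ""  -- KeyError; excluded by Pre_suggest_action_py

-- ===== PORT B =====
def pvGo : List (List (String × String)) → Bool → Bool → String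
  | [], has_date, has_unreferenced =>
    if has_date && has_unreferenced then "archive"
    else if has_date then "review_and_update"
    else "review"
  | r :: rest, has_date, has_unreferenced =>
    match (PySem.Dict.ofList r).get? "type" with
    | none => ""  -- KeyError; excluded by Pre_suggest_action_py
    | some t =>
      if t = "duplicate" then "archive_or_delete"
      else if t = "date" then pvGo rest true has_unreferenced
      else if t = "unreferenced" then pvGo rest has_date true
      else pvGo rest has_date has_unreferenced

def suggest_action_py_alt (reasons : List (List (String × String))) : String :=
  pvGo reasons false false

-- ===== PRECONDITION & SPEC =====
def pvKeyOk (r : List (String × String)) : Bool := ((PySem.Dict.ofList r).get? "type").isSome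
-- the prefix of reasons before the first dict missing the "type" key
def pvPfx (reasons : List (List (String × String))) : List (List (String × String)) :=
  reasons.takeWhile pvKeyOk
def pvHasType (rs : List (List (String × String))) (t : String) : Bool :=
  rs.any (fun r => (PySem.Dict.ofList r).get? "type" == some t)

-- Pre_ excludes exactly the inputs where the Python A raises KeyError: some dict lacks the
-- "type" key and not all three reason types occur before the first such dict (A's three
-- any()-scans each short-circuit only at their own target type).
def Pre_suggest_action_py (reasons : List (List (String × String))) : Prop :=
  (∀ r ∈ reasons, pvKeyOk r = true) ∨
  (pvHasType (pvPfx reasons) "duplicate" = true ∧ pvHasType (pvPfx reasons) "date" = true ∧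
   pvHasType (pvPfx reasons) "unreferenced" = true)
instance (reasons : List (List (String × String))) : Decidable (Pre_suggest_action_py reasons) := by
  unfold Pre_suggest_action_py; infer_instance

def pvWitness_suggest_action_py : (List (List (String × String))) :=
  [[("type", "date")], [("type", "unreferenced")]]

def Spec_suggest_action_py (reasons : List (List (String × String))) (out : String) : Prop := out = suggest_action_py_alt reasons
instance (reasons : List (List (String × String))) (out : String) : Decidable (Spec_suggest_action_py reasons out) := by unfold Spec_suggest_action_py; infer_instance

-- ===== CLAIM (what is proved, stated in full; the proofs are below) =====
def Claim_equal_suggest_action_py : Prop := ∀ (reasons : List (List (String × String))), Dom_suggest_action_py reasons → Pre_suggest_action_py reasons → Spec_suggest_action_py reasons (suggest_action_py reasons)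

-- ===== LEMMAS AND PROOFS =====

-- if every dict has the key, each scan returns a value
lemma pvAnyIs_some_of_allKeys (reasons : List (List (String × String)))
    (h : ∀ r ∈ reasons, pvKeyOk r = true) (t : String) :
    ∃ b, pvAnyIs reasons t = some b := by
  induction reasons with
  | nil => exact ⟨false, rfl⟩
  | cons r rest ih =>
    have hr : pvKeyOk r = true := h r (by simp)
    unfold pvKeyOk at hr
    cases hget : (PySem.Dict.ofList r).get? "type" with
    | none => rw [hget] at hr; simp at hr
    | some v =>
      by_cases hv : v = t
      · exact ⟨true, by simp [pvAnyIs, hget, hv]⟩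
      · obtain ⟨b, hb⟩ := ih (fun x hx => h x (by simp [hx]))
        exact ⟨b, by simp [pvAnyIs, hget, hv, hb]⟩

-- if a "duplicate" reason appears before any missing "type" key, B returns immediately
lemma pvGo_dup (reasons : List (List (String × String))) :
    ∀ (hd hu : Bool), pvAnyIs reasons "duplicate" = some true →
    pvGo reasons hd hu = "archive_or_delete" := by
  induction reasons with
  | nil => intro hd hu h; simp [pvAnyIs] at h
  | cons r rest ih =>
    intro hd hu h
    cases hget : (PySem.Dict.ofList r).get? "type" with
    | none => simp [pvAnyIs, hget] at h
    | some v =>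
      simp only [pvAnyIs, hget] at h
      simp only [pvGo, hget]
      by_cases hv1 : v = "duplicate"
      · rw [if_pos hv1]
      · rw [if_neg hv1] at h
        rw [if_neg hv1]
        by_cases hv2 : v = "date"
        · rw [if_pos hv2]; exact ih true hu h
        · rw [if_neg hv2]
          by_cases hv3 : v = "unreferenced"
          · rw [if_pos hv3]; exact ih hd true h
          · rw [if_neg hv3]; exact ih hd hu h

-- when every dict has the key, B's single pass agrees with A's three scans, for any flag state
lemma pvGo_eq (reasons : List (List (String × String))) :
    ∀ (hd hu d a u : Bool), (∀ r ∈ reasons, pvKeyOk r = true) →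
    pvAnyIs reasons "duplicate" = some d → pvAnyIs reasons "date" = some a →
    pvAnyIs reasons "unreferenced" = some u →
    pvGo reasons hd hu =
      (if d then "archive_or_delete"
       else if (hd || a) && (hu || u) then "archive"
       else if (hd || a) then "review_and_update"
       else "review") := by
  induction reasons with
  | nil =>
    intro hd hu d a u _ h1 h2 h3
    simp [pvAnyIs] at h1 h2 h3
    subst h1; subst h2; subst h3
    cases hd <;> cases hu <;> simp [pvGo]
  | cons r rest ih =>
    intro hd hu d a u hkeys h1 h2 h3
    have hkr : ∀ x ∈ rest, pvKeyOk x = true := fun x hx => hkeys x (by simp [hx])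
    cases hget : (PySem.Dict.ofList r).get? "type" with
    | none => simp [pvAnyIs, hget] at h1
    | some v =>
      simp only [pvAnyIs, hget] at h1 h2 h3
      simp only [pvGo, hget]
      by_cases hv1 : v = "duplicate"
      · rw [if_pos hv1] at h1; rw [if_pos hv1]
        injection h1 with h1'
        rw [← h1']
        simp
      · rw [if_neg hv1] at h1; rw [if_neg hv1]
        by_cases hv2 : v = "date"
        · rw [if_pos hv2] at h2; rw [if_pos hv2]
          injection h2 with h2'
          have hv3 : ¬ v = "unreferenced" := by rw [hv2]; decide
          rw [if_neg hv3] at h3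
          obtain ⟨a', ha'⟩ := pvAnyIs_some_of_allKeys rest hkr "date"
          rw [ih true hu d a' u hkr h1 ha' h3, ← h2']
          cases d <;> simp
        · rw [if_neg hv2] at h2; rw [if_neg hv2]
          by_cases hv3 : v = "unreferenced"
          · rw [if_pos hv3] at h3; rw [if_pos hv3]
            injection h3 with h3'
            obtain ⟨u', hu'⟩ := pvAnyIs_some_of_allKeys rest hkr "unreferenced"
            rw [ih hd true d a u' hkr h1 h2 hu', ← h3']
            cases d <;> cases a <;> cases hd <;> simp
          · rw [if_neg hv3] at h3; rw [if_neg hv3]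
            exact ih hd hu d a u hkr h1 h2 h3

-- if type t occurs in the prefix before the first missing key, the t-scan returns True
lemma pvAnyIs_true_of_hasType (reasons : List (List (String × String))) (t : String)
    (h : pvHasType (pvPfx reasons) t = true) : pvAnyIs reasons t = some true := by
  induction reasons with
  | nil => simp [pvHasType, pvPfx] at h
  | cons r rest ih =>
    by_cases hk : pvKeyOk r = true
    · unfold pvKeyOk at hk
      cases hget : (PySem.Dict.ofList r).get? "type" with
      | none => rw [hget] at hk; simp at hk
      | some v =>
        simp only [pvPfx, pvHasType, List.takeWhile] at h
        rw [show pvKeyOk r = true from by unfold pvKeyOk; rw [hget]; rfl] at h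
        simp only [List.any_cons, hget] at h
        by_cases hv : v = t
        · simp [pvAnyIs, hget, hv]
        · simp [hv] at h
          simp [pvAnyIs, hget, hv]
          exact ih (by simpa [pvHasType, pvPfx] using h)
    · simp only [pvPfx, List.takeWhile] at h
      rw [Bool.of_not_eq_true hk] at h
      simp [pvHasType] at h

theorem suggest_action_py_spec : Claim_equal_suggest_action_py := by
  intro reasons _ hpre
  unfold Spec_suggest_action_py suggest_action_py suggest_action_py_alt
  rcases hpre with h | ⟨h1, h2, h3⟩
  · obtain ⟨d, hd⟩ := pvAnyIs_some_of_allKeys reasons h "duplicate"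
    obtain ⟨a, ha⟩ := pvAnyIs_some_of_allKeys reasons h "date"
    obtain ⟨u, hu⟩ := pvAnyIs_some_of_allKeys reasons h "unreferenced"
    rw [pvGo_eq reasons false false d a u h hd ha hu, hd, ha, hu]
    simp
  · have hd := pvAnyIs_true_of_hasType reasons "duplicate" h1
    have ha := pvAnyIs_true_of_hasType reasons "date" h2
    have hu := pvAnyIs_true_of_hasType reasons "unreferenced" h3
    rw [pvGo_dup reasons false false hd, hd, ha, hu]
    rfl
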